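-- pv_equiv track=rewrite | github.com/AlessandroGozzoli/Hydrological-Model-Validator | Processing/Leap_year.py | true_time_series_length
-- ===== SOURCE A (Python) =====
-- def leapyear(year):
--     if (year % 4 == 0 and year % 100 != 0) or (year % 400 == 0):
--         return 1
--     return 0
--
-- def true_time_series_length(nf, chlfstart, chlfend, DinY):
--     Truedays = 0  # Initialize the total number of days
--     fdays = [0] * nf  # List to store the number of days for each file
--     nspan = [0] * nf  # List to store the span of years for each file
--
--     for n in range(nf):
--         # Define the time span (in years) for each file
--         nspan[n] = chlfend[n] - chlfstart[n] + 1
--         fdays[n] = 0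
--
--         # Define the "true" number of days in each file
--         for y in range(chlfstart[n], chlfend[n] + 1):
--             # If year "y" is a leap year, one day is added
--             fdays[n] += DinY + leapyear(y)
--
--         Truedays += fdays[n]
--
--     return Truedays
-- ===== SOURCE B (Python) =====
-- def true_time_series_length(nf, chlfstart, chlfend, DinY):
--     # Closed-form leap-year count: no inner loop over the years of each file.
--     def L(y):
--         return y // 4 - y // 100 + y // 400
--     m = max(nf, 0)
--     total = 0
--     for s, e in zip(chlfstart[:m], chlfend[:m]):
--         if s <= e:
--             total += (e - s + 1) * DinY + L(e) - L(s - 1)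
--     return total
-- ===== Notes on version B (the rewrite author's own statement) =====
-- stated objective: faster
-- what changed: Replaces the inner per-year loop with the closed-form leap-year count L(y)=y//4-y//100+y//400, so each file's day count is a constant-time formula over a zip of the two lists.
import Mathlib
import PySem

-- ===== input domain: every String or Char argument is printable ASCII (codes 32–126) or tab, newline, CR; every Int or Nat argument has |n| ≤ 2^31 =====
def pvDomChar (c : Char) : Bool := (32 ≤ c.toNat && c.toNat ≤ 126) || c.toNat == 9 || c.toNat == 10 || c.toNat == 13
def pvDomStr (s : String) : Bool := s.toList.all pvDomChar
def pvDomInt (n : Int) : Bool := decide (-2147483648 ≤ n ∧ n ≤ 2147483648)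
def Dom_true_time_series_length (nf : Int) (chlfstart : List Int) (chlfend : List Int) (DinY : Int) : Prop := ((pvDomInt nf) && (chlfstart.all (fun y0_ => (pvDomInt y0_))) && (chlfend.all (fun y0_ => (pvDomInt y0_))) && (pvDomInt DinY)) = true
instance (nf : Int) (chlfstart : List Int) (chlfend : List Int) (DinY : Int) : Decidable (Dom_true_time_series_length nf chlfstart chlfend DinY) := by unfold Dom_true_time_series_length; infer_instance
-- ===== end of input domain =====

-- B replaces A's per-year inner loop with the closed-form leap count L(y)=y//4-y//100+y//400 (faster: O(nf) vs O(nf*years)).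

-- ===== PORT A =====
-- leapyear(year) of A
def pvLeapyear (year : Int) : Int :=
  if (PySem.Int.mod year 4 = 0 ∧ PySem.Int.mod year 100 ≠ 0) ∨ PySem.Int.mod year 400 = 0 then 1 else 0

def true_time_series_length (nf : Int) (chlfstart : List Int) (chlfend : List Int) (DinY : Int) : Int :=
  -- state = (Truedays, fdays, nspan); chlfstart[n]/chlfend[n] via pyGetD (Pre_ puts n in range)
  let init : Int × List Int × List Int := (0, List.replicate nf.toNat 0, List.replicate nf.toNat 0)
  let st := (PySem.List.pyRange 0 nf 1).foldl (fun st n =>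
      let sn := PySem.List.pyGetD chlfstart n 0
      let en := PySem.List.pyGetD chlfend n 0
      let nspan' := st.2.2.set n.toNat (en - sn + 1)
      -- fdays[n] starts at 0, then fdays[n] += DinY + leapyear(y) for each y in range(sn, en+1)
      let fdn := (PySem.List.pyRange sn (en + 1) 1).foldl (fun fd y => fd + (DinY + pvLeapyear y)) 0
      let fdays' := st.2.1.set n.toNat fdn
      (st.1 + fdn, fdays', nspan')) init
  st.1

-- ===== PORT B =====
-- L(y) = y//4 - y//100 + y//400
def pvL (y : Int) : Int :=
  PySem.Int.floordiv y 4 - PySem.Int.floordiv y 100 + PySem.Int.floordiv y 400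

def true_time_series_length_alt (nf : Int) (chlfstart : List Int) (chlfend : List Int) (DinY : Int) : Int :=
  let m := (max nf 0).toNat
  ((chlfstart.take m).zip (chlfend.take m)).foldl (fun total p =>
      if p.1 ≤ p.2 then total + (p.2 - p.1 + 1) * DinY + pvL p.2 - pvL (p.1 - 1) else total) 0

-- ===== PRECONDITION & SPEC =====
-- Pre_ excludes exactly the inputs where A raises IndexError (an index 0..nf-1 beyond either list).
def Pre_true_time_series_length (nf : Int) (chlfstart : List Int) (chlfend : List Int) (DinY : Int) : Prop :=
  nf ≤ (chlfstart.length : Int) ∧ nf ≤ (chlfend.length : Int)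
instance (nf : Int) (chlfstart : List Int) (chlfend : List Int) (DinY : Int) : Decidable (Pre_true_time_series_length nf chlfstart chlfend DinY) := by unfold Pre_true_time_series_length; infer_instance

def pvWitness_true_time_series_length : Int × List Int × List Int × Int := (2, [1999, 2004], [2000, 2005], 365)

def Spec_true_time_series_length (nf : Int) (chlfstart : List Int) (chlfend : List Int) (DinY : Int) (out : Int) : Prop := out = true_time_series_length_alt nf chlfstart chlfend DinY
instance (nf : Int) (chlfstart : List Int) (chlfend : List Int) (DinY : Int) (out : Int) : Decidable (Spec_true_time_series_length nf chlfstart chlfend DinY out) := by unfold Spec_true_time_series_length; infer_instance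

-- ===== CLAIM (what is proved, stated in full; the proofs are below) =====
def Claim_equal_true_time_series_length : Prop := ∀ (nf : Int) (chlfstart : List Int) (chlfend : List Int) (DinY : Int), Dom_true_time_series_length nf chlfstart chlfend DinY → Pre_true_time_series_length nf chlfstart chlfend DinY → Spec_true_time_series_length nf chlfstart chlfend DinY (true_time_series_length nf chlfstart chlfend DinY)

-- ===== LEMMAS AND PROOFS =====

-- one step of the closed form equals leapyear
lemma pvL_step (y : Int) : pvL y - pvL (y - 1) = pvLeapyear y := by
  unfold pvL pvLeapyear
  have h4 : ∀ a : Int, PySem.Int.floordiv a 4 = a / 4 := fun a =>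
    PySem.Int.floordiv_eq_ediv_of_pos (by norm_num)
  have h100 : ∀ a : Int, PySem.Int.floordiv a 100 = a / 100 := fun a =>
    PySem.Int.floordiv_eq_ediv_of_pos (by norm_num)
  have h400 : ∀ a : Int, PySem.Int.floordiv a 400 = a / 400 := fun a =>
    PySem.Int.floordiv_eq_ediv_of_pos (by norm_num)
  have m4 : ∀ a : Int, PySem.Int.mod a 4 = a % 4 := fun a =>
    PySem.Int.mod_eq_emod_of_pos (by norm_num)
  have m100 : ∀ a : Int, PySem.Int.mod a 100 = a % 100 := fun a =>
    PySem.Int.mod_eq_emod_of_pos (by norm_num)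
  have m400 : ∀ a : Int, PySem.Int.mod a 400 = a % 400 := fun a =>
    PySem.Int.mod_eq_emod_of_pos (by norm_num)
  simp only [h4, h100, h400, m4, m100, m400]
  split_ifs with h <;> omega

-- A's inner loop over range(s, s+k) as a closed form
lemma pv_inner_sum (DinY : Int) (k : Nat) : ∀ (s c : Int),
    (PySem.List.pyRange s (s + k) 1).foldl (fun fd y => fd + (DinY + pvLeapyear y)) c
      = c + k * DinY + (pvL (s + k - 1) - pvL (s - 1)) := by
  induction k with
  | zero => intro s c; simp
  | succ k ih =>
    intro s c
    have h1 : s + ((k:Int) + 1) = (s + k) + 1 := by ring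
    have h2 : s ≤ s + (k:Int) := by omega
    rw [show ((k+1 : Nat) : Int) = (k:Int) + 1 by push_cast; ring, h1,
        PySem.List.pyRange_one_succ_right h2, List.foldl_append]
    simp only [List.foldl_cons, List.foldl_nil]
    rw [ih s c]
    have hstep := pvL_step (s + k)
    simp only [Nat.cast_add, Nat.cast_one, add_sub_cancel_right]
    linear_combination -hstep

-- one file's contribution in B
def pvContrib (DinY : Int) (p : Int × Int) : Int :=
  if p.1 ≤ p.2 then (p.2 - p.1 + 1) * DinY + pvL p.2 - pvL (p.1 - 1) else 0

lemma pv_foldl_if_add (DinY : Int) (l : List (Int × Int)) : ∀ (c : Int),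
    l.foldl (fun total p =>
      if p.1 ≤ p.2 then total + (p.2 - p.1 + 1) * DinY + pvL p.2 - pvL (p.1 - 1) else total) c
      = c + (l.map (pvContrib DinY)).sum := by
  induction l with
  | nil => intro c; simp
  | cons p l ih =>
    intro c
    simp only [List.foldl_cons, List.map_cons, List.sum_cons, ih]
    unfold pvContrib
    split_ifs <;> ring

-- A's inner loop equals B's per-file contribution
lemma pv_file_eq (DinY s e : Int) :
    (PySem.List.pyRange s (e + 1) 1).foldl (fun fd y => fd + (DinY + pvLeapyear y)) 0
      = pvContrib DinY (s, e) := by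
  unfold pvContrib
  by_cases h : s ≤ e
  · have hk : e + 1 = s + ((e + 1 - s).toNat : Int) := by omega
    rw [hk, pv_inner_sum]
    have : s + ((e + 1 - s).toNat : Int) - 1 = e := by omega
    rw [this]
    simp only [if_pos h]
    have : ((e + 1 - s).toNat : Int) = e - s + 1 := by omega
    rw [this]; ring
  · rw [PySem.List.pyRange_one_eq_nil (by omega : e + 1 ≤ s)]
    simp [h]

-- A's outer fold: the Truedays component is the sum of contributions over the zipped prefixes
lemma pv_outer (chlfstart chlfend : List Int) (DinY : Int) (k : Nat)
    (hs : k ≤ chlfstart.length) (he : k ≤ chlfend.length) :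
    ∀ (st : Int × List Int × List Int),
    ((PySem.List.pyRange 0 (k : Int) 1).foldl (fun st n =>
      let sn := PySem.List.pyGetD chlfstart n 0
      let en := PySem.List.pyGetD chlfend n 0
      let nspan' := st.2.2.set n.toNat (en - sn + 1)
      let fdn := (PySem.List.pyRange sn (en + 1) 1).foldl (fun fd y => fd + (DinY + pvLeapyear y)) 0
      let fdays' := st.2.1.set n.toNat fdn
      (st.1 + fdn, fdays', nspan')) st).1
      = st.1 + (((chlfstart.take k).zip (chlfend.take k)).map (pvContrib DinY)).sum := by
  induction k with
  | zero => intro st; simp [PySem.List.pyRange_one_eq_nil (by omega : (0:Int) ≤ 0)]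
  | succ k ih =>
    intro st
    rw [show ((k+1 : Nat) : Int) = (k:Int) + 1 by push_cast; ring,
        PySem.List.pyRange_one_succ_right (by omega : (0:Int) ≤ k), List.foldl_append]
    simp only [List.foldl_cons, List.foldl_nil]
    rw [ih (by omega) (by omega)]
    have hsk : k < chlfstart.length := by omega
    have hek : k < chlfend.length := by omega
    have hgs : PySem.List.pyGetD chlfstart (k : Int) 0 = chlfstart[k] := by
      simp [PySem.List.pyGetD_natCast, List.getD, List.getElem?_eq_getElem hsk]
    have hge : PySem.List.pyGetD chlfend (k : Int) 0 = chlfend[k] := by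
      simp [PySem.List.pyGetD_natCast, List.getD, List.getElem?_eq_getElem hek]
    rw [List.take_add_one, List.take_add_one,
        List.getElem?_eq_getElem hsk, List.getElem?_eq_getElem hek]
    simp only [Option.toList_some]
    rw [List.zip_append (by simp [hsk.le, hek.le])]
    simp only [List.map_append, List.sum_append, List.zip_cons_cons, List.zip_nil_right,
      List.map_cons, List.map_nil, List.sum_cons, List.sum_nil]
    rw [hgs, hge, pv_file_eq]
    ring

-- ===== VERDICT (by name: the statement is the Claim_ definition above) =====
theorem true_time_series_length_spec : Claim_equal_true_time_series_length := by
  intro nf chlfstart chlfend DinY _hDom hPre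
  unfold Spec_true_time_series_length true_time_series_length true_time_series_length_alt
  obtain ⟨hs, he⟩ := hPre
  rw [pv_foldl_if_add]
  by_cases hnf : 0 < nf
  · obtain ⟨k, rfl⟩ : ∃ k : Nat, nf = (k : Int) := ⟨nf.toNat, by omega⟩
    rw [pv_outer chlfstart chlfend DinY k (by omega) (by omega)]
    have hm : (max (k : Int) 0).toNat = k := by omega
    rw [hm]
  · have h0 : (max nf 0).toNat = 0 := by omega
    rw [PySem.List.pyRange_one_eq_nil (by omega : nf ≤ 0), h0]
    simp
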